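-- pv_equiv track=rewrite | github.com/miqueiasads/Python | CALCULADORA FINAL.py | opd
-- ===== SOURCE A (Python) =====
-- def opd (numero):
--     resposta = []
--     soma = 0
--     numero = str(numero)
--     numero = numero[::-1]
--     cont = 0
--     for num in numero:
--         num = int(num)
--         resposta.append(num)
--     for i in resposta:
--         soma += i * (8 ** cont)
--         cont += 1
--     return soma
-- ===== SOURCE B (Python) =====
-- def opd(numero):
--     soma = 0
--     for ch in str(numero):
--         soma = soma * 8 + int(ch)
--     return soma
-- ===== Notes on version B (the rewrite author's own statement) =====
-- stated objective: simpler
-- what changed: Replaces reverse-the-string + intermediate digit list + explicit growing-power accumulation with a single left-to-right Horner multiply-accumulate pass over the decimal representation.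
import Mathlib
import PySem

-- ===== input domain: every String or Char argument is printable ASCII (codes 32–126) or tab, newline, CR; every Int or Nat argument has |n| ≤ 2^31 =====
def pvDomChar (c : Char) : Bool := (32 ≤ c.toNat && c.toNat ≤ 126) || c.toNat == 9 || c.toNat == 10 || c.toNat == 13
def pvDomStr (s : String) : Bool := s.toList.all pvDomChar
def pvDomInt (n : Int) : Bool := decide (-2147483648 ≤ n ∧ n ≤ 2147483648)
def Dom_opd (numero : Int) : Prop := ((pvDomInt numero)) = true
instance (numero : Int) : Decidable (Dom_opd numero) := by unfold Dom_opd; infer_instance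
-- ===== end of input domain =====

-- B replaces A's reverse + digit list + 8**cont powers with a single left-to-right Horner pass (simpler).

-- ===== PORT A =====
-- int(ch) for one character, as Python: exact on digit chars admitted by Pre_ (never none there)
def pvDigit (c : Char) : Int := (PySem.Int.ofStr? (String.mk [c])).getD 0

def opd (numero : Int) : Int :=
  -- resposta = []; soma = 0; numero = str(numero); numero = numero[::-1]; cont = 0
  let s := (PySem.Int.toStr numero).toList
  let rev := (PySem.List.slice? s none none (-1)).getD []
  -- for num in numero: resposta.append(int(num))
  let resposta := rev.map pvDigit
  -- for i in resposta: soma += i * (8 ** cont); cont += 1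
  (resposta.foldl (fun (p : Int × Nat) i => (p.1 + i * 8 ^ p.2, p.2 + 1)) (0, 0)).1

-- ===== PORT B =====
def opd_alt (numero : Int) : Int :=
  (PySem.Int.toStr numero).toList.foldl (fun soma c => soma * 8 + pvDigit c) 0

-- ===== PRECONDITION & SPEC =====
-- Pre_ excludes negative numero, on which both Pythons raise ValueError (int('-')).
def Pre_opd (numero : Int) : Prop := 0 ≤ numero
instance (numero : Int) : Decidable (Pre_opd numero) := by unfold Pre_opd; infer_instance
def pvWitness_opd : Int := (123)
def Spec_opd (numero : Int) (out : Int) : Prop := out = opd_alt numero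
instance (numero : Int) (out : Int) : Decidable (Spec_opd numero out) := by unfold Spec_opd; infer_instance

-- ===== CLAIM (what is proved, stated in full; the proofs are below) =====
def Claim_equal_opd : Prop := ∀ (numero : Int), Dom_opd numero → Pre_opd numero → Spec_opd numero (opd numero)

-- ===== LEMMAS AND PROOFS =====

-- value of a digit list, least-significant first: V [d0,d1,…] = Σ dᵢ * 8^i
def pvV : List Int → Int
  | [] => 0
  | x :: xs => x + 8 * pvV xs

theorem pvAfold (ds : List Int) (s : Int) (k : Nat) :
    (ds.foldl (fun (p : Int × Nat) i => (p.1 + i * 8 ^ p.2, p.2 + 1)) (s, k)).1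
      = s + 8 ^ k * pvV ds := by
  induction ds generalizing s k with
  | nil => simp [pvV]
  | cons x xs ih =>
    simp only [List.foldl, pvV, ih]
    ring

theorem pvBfold (l : List Char) :
    l.foldl (fun soma c => soma * 8 + pvDigit c) 0 = pvV (l.reverse.map pvDigit) := by
  induction l using List.reverseRecOn with
  | nil => simp [pvV]
  | append_singleton l c ih =>
    simp [List.foldl_append, ih, pvV]; ring

-- ===== VERDICT (by name: the statement is the Claim_ definition above) =====
theorem opd_spec : Claim_equal_opd := by
  intro numero _ _
  show opd numero = opd_alt numero
  unfold opd opd_alt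
  simp only [PySem.List.slice?_none_none_neg_one, Option.getD_some]
  rw [pvAfold, pvBfold]
  simp
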